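-- pv_equiv track=rewrite | github.com/MrBrantCode/unitest_baseline | mut_generate/mist_train_taco/taco_12344/solution.py | count_visit_ways
-- ===== SOURCE A (Python) =====
-- MOD = 10 ** 9 + 7
--
-- fac = [0] * (10 ** 5 + 1)
--
-- def pre():
--     fac[0] = 1
--     for i in range(1, 10 ** 5 + 1):
--         fac[i] = fac[i - 1] * i
--         fac[i] = fac[i] % MOD
--
-- def dfs(gp, vertex, visited, deg, ans):
--     visited[vertex] = 1
--     stack = []
--     stack.append(vertex)
--     while len(stack) > 0:
--         vertex = stack.pop()
--         ans = ans % MOD * fac[deg[vertex]] % MOD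
--         ans %= MOD
--         for i in gp[vertex]:
--             if not visited[i]:
--                 visited[i] = 1
--                 if vertex in gp[i]:
--                     deg[i] -= 1
--                 stack.append(i)
--     return ans % MOD
--
-- def count_visit_ways(n, roads, start_city):
--     pre()
--     deg = [0] * (n + 1)
--     gp = [[] for _ in range(n + 1)]
--
--     for (a, b) in roads:
--         gp[a].append(b)
--         gp[b].append(a)
--         deg[a] += 1
--         deg[b] += 1
--
--     visited = [0] * (n + 1)
--     return dfs(gp, start_city, visited, deg, 1) % MOD
-- ===== SOURCE B (Python) =====
-- MOD = 10 ** 9 + 7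
--
-- def count_visit_ways(n, roads, start_city):
--     # factorial table mod MOD up to the problem bound
--     fac = [0] * (10 ** 5 + 1)
--     fac[0] = 1
--     for i in range(1, 10 ** 5 + 1):
--         fac[i] = fac[i - 1] * i % MOD
--
--     # degree of every city, counted straight off the road list (no graph built)
--     deg = [0] * (n + 1)
--     for (a, b) in roads:
--         deg[a] += 1
--         deg[b] += 1
--
--     # reachable set of start_city by repeated relaxation passes over the edge
--     # list (semi-naive closure): no adjacency lists, no stack, no DFS
--     reach = [start_city]
--     in_reach = {start_city}
--     changed = True
--     while changed:
--         changed = False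
--         for (a, b) in roads:
--             if (a in in_reach) != (b in in_reach):
--                 c = b if a in in_reach else a
--                 reach.append(c)
--                 in_reach.add(c)
--                 changed = True
--
--     # arithmetic pass: the start contributes fac[deg], every other reachable
--     # vertex entered through one parent edge contributes fac[deg-1]
--     ans = fac[deg[start_city]]
--     for v in reach[1:]:
--         ans = ans * fac[deg[v] - 1] % MOD
--     return ans
-- ===== Notes on version B (the rewrite author's own statement) =====
-- stated objective: alternative
-- what changed: B never builds adjacency lists and never traverses: it computes the reachable set by repeated relaxation passes over the raw edge list (semi-naive transitive closure with a membership set), counts degrees in one direct pass, and then multiplies fac[deg[v]-1] (closed parent-edge form, fac[deg] for the start) in a separate arithmetic pass; A does a mutating stack DFS over adjacency lists with in-traversal degree decrements and 'vertex in gp[i]' membership scans.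
-- outside the precondition, e.g. on count_visit_ways(2, [(-3, 1), (-2, -3), (2, -2)], 0): A returns 12, B returns 2; on count_visit_ways(1, [(1, -1), (-1, -2), (-2, -1)], -1): A returns 24, B returns 144
import Mathlib
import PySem

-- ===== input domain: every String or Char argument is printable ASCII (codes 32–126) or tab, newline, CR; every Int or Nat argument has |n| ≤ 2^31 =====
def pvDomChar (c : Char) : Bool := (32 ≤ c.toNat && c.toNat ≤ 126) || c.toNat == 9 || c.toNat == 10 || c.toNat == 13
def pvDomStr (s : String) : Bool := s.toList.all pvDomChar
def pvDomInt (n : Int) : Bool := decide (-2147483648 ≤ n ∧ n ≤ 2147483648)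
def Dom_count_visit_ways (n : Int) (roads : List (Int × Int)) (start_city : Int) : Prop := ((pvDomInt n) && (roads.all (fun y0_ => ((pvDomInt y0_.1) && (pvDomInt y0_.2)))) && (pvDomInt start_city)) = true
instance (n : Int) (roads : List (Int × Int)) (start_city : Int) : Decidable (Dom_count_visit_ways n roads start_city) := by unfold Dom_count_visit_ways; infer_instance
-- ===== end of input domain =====

-- B replaces A's mutating stack DFS over adjacency lists by two differently shaped passes
-- with no graph structure at all: the reachable set is computed by repeated relaxation
-- passes over the raw edge list (semi-naive closure with a membership set), degrees are
-- counted in a dict straight off the road list, and a separate arithmetic pass multiplies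
-- fac[deg[v]-1] (closed parent-edge form; fac[deg] for the start) (objective: alternative).

-- shared low-level helpers: Python list indexing/assignment with an int index,
-- including Python's negative-index wraparound (cell = i + len for -len ≤ i < 0);
-- exact for -len ≤ i < len, the range on which Python does not raise (Pre_'s range)
def pvMOD : Int := 10 ^ 9 + 7
def pvCell (sz : Nat) (i : Int) : Int := if i < 0 then i + sz else i
def pvGetI (xs : Array Int) (i : Int) : Int := xs.getD (pvCell xs.size i).toNat 0
def pvSetI (xs : Array Int) (i : Int) (v : Int) : Array Int :=
  if -(xs.size : Int) ≤ i then xs.setIfInBounds (pvCell xs.size i).toNat v else xs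
def pvGetL (xs : Array (List Int)) (i : Int) : List Int := xs.getD (pvCell xs.size i).toNat []
def pvSetL (xs : Array (List Int)) (i : Int) (v : List Int) : Array (List Int) :=
  if -(xs.size : Int) ≤ i then xs.setIfInBounds (pvCell xs.size i).toNat v else xs
-- number of unvisited cells — termination measure for A's while-loop
def pvZ (vis : Array Int) : Nat := vis.toList.countP (fun x => x == 0)

-- termination lemmas (cited by the ports' decreasing_by)
theorem pvCountP_set_lt (l : List Int) (k : Nat) (h : k < l.length) (h0 : l[k] = 0) :
    (l.set k 1).countP (fun x => x == 0) < l.countP (fun x => x == 0) := by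
  induction l generalizing k with
  | nil => simp at h
  | cons x xs ih =>
    cases k with
    | zero => simp_all
    | succ k =>
      simp only [List.set_cons_succ, List.countP_cons]
      have := ih k (by simpa using h) (by simpa using h0)
      omega

theorem pvCell_bounds (sz : Nat) (c : Int) (h1 : -(sz : Int) ≤ c) (h2 : c < (sz : Int)) :
    0 ≤ pvCell sz c ∧ pvCell sz c < (sz : Int) := by
  unfold pvCell; split_ifs <;> omega

theorem pvZ_setOne_lt (vis : Array Int) (i : Int)
    (h0 : -(vis.size : Int) ≤ i) (h1 : i < (vis.size : Int)) (h2 : pvGetI vis i = 0) :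
    pvZ (pvSetI vis i 1) < pvZ vis := by
  obtain ⟨hc0, hc1⟩ := pvCell_bounds vis.size i h0 h1
  have hlt : (pvCell vis.size i).toNat < vis.size := by omega
  have hget : vis.toList[(pvCell vis.size i).toNat] = 0 := by
    have := h2
    simp only [pvGetI, Array.getD, hlt, dif_pos] at this
    simpa [Array.getElem_toList] using this
  have := pvCountP_set_lt vis.toList (pvCell vis.size i).toNat (by simpa using hlt) hget
  simp only [pvZ, pvSetI, if_pos h0]
  simpa [Array.toList_setIfInBounds] using this

-- ===== PORT A =====
-- pre(): the factorial table fac[0..10^5] mod MOD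
def pvFacA : Array Int :=
  (PySem.List.pyRange 1 100001 1).foldl
    (fun f i => pvSetI f i (PySem.Int.mod (pvGetI f (i - 1) * i) pvMOD))
    ((Array.replicate 100001 (0 : Int)).setIfInBounds 0 1)

-- the graph/degree build loop of count_visit_ways
def pvBuildA (n : Int) (roads : List (Int × Int)) : Array (List Int) × Array Int :=
  roads.foldl
    (fun gd p =>
      (pvSetL (pvSetL gd.1 p.1 (pvGetL gd.1 p.1 ++ [p.2])) p.2
         (pvGetL (pvSetL gd.1 p.1 (pvGetL gd.1 p.1 ++ [p.2])) p.2 ++ [p.1]),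
       pvSetI (pvSetI gd.2 p.1 (pvGetI gd.2 p.1 + 1)) p.2
         (pvGetI (pvSetI gd.2 p.1 (pvGetI gd.2 p.1 + 1)) p.2 + 1)))
    (Array.replicate (n + 1).toNat ([] : List Int), Array.replicate (n + 1).toNat (0 : Int))

-- dfs's inner 'for i in gp[vertex]' (the range test is a totality guard; within
-- Pre_ every neighbour is in range, so it is exactly Python's 'if not visited[i]')
def pvScanA (gp : Array (List Int)) (vertex : Int) (nbrs : List Int)
    (vis deg : Array Int) (stack : List Int) : Array Int × Array Int × List Int :=
  match nbrs with
  | [] => (vis, deg, stack)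
  | i :: rest =>
    if -(vis.size : Int) ≤ i ∧ i < (vis.size : Int) ∧ pvGetI vis i = 0 then
      pvScanA gp vertex rest (pvSetI vis i 1)
        (if vertex ∈ pvGetL gp i then pvSetI deg i (pvGetI deg i - 1) else deg)
        (i :: stack)
    else pvScanA gp vertex rest vis deg stack

theorem pvScanA_measure (gp : Array (List Int)) (vertex : Int) (nbrs : List Int)
    (vis deg : Array Int) (stack : List Int) :
    2 * pvZ (pvScanA gp vertex nbrs vis deg stack).1 +
      (pvScanA gp vertex nbrs vis deg stack).2.2.length ≤ 2 * pvZ vis + stack.length := by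
  induction nbrs generalizing vis deg stack with
  | nil => simp [pvScanA]
  | cons i rest ih =>
    simp only [pvScanA]
    split
    · rename_i h
      have hz := pvZ_setOne_lt vis i h.1 h.2.1 h.2.2
      have := ih (pvSetI vis i 1)
        (if vertex ∈ pvGetL gp i then pvSetI deg i (pvGetI deg i - 1) else deg) (i :: stack)
      simp only [List.length_cons] at this ⊢
      omega
    · exact ih vis deg stack

-- dfs's while-loop (stack top = Python list end, so pop() = head here)
def pvDfsA (gp : Array (List Int)) (stack : List Int) (vis deg : Array Int) (ans : Int) : Int :=
  match stack with
  | [] => PySem.Int.mod ans pvMOD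
  | vertex :: rest =>
    -- fac[deg[vertex]]: exact for 0 ≤ deg[vertex] ≤ 10^5, which Pre_ guarantees
    let ans1 := PySem.Int.mod (PySem.Int.mod ans pvMOD * pvFacA.getD (pvGetI deg vertex).toNat 0) pvMOD
    let ans2 := PySem.Int.mod ans1 pvMOD
    let r := pvScanA gp vertex (pvGetL gp vertex) vis deg rest
    pvDfsA gp r.2.2 r.1 r.2.1 ans2
termination_by 2 * pvZ vis + stack.length
decreasing_by
  have h := pvScanA_measure gp vertex (pvGetL gp vertex) vis deg rest
  simp only [List.length_cons]
  omega

def count_visit_ways (n : Int) (roads : List (Int × Int)) (start_city : Int) : Int :=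
  let gd := pvBuildA n roads
  let vis := pvSetI (Array.replicate (n + 1).toNat (0 : Int)) start_city 1
  PySem.Int.mod (pvDfsA gd.1 [start_city] vis gd.2 1) pvMOD

-- ===== PORT B =====
-- the same factorial table (B's python builds it the same way)
def pvFacB : Array Int :=
  (PySem.List.pyRange 1 100001 1).foldl
    (fun f i => pvSetI f i (PySem.Int.mod (pvGetI f (i - 1) * i) pvMOD))
    ((Array.replicate 100001 (0 : Int)).setIfInBounds 0 1)

-- 'deg = [0] * (n + 1); for (a, b) in roads: deg[a] += 1; deg[b] += 1'
def pvDegB (n : Int) (roads : List (Int × Int)) : Array Int :=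
  roads.foldl
    (fun d p => pvSetI (pvSetI d p.1 (pvGetI d p.1 + 1)) p.2
      (pvGetI (pvSetI d p.1 (pvGetI d p.1 + 1)) p.2 + 1))
    (Array.replicate (n + 1).toNat (0 : Int))

-- one relaxation pass: 'for (a, b) in roads: if (a in in_reach) != (b in in_reach): …'
def pvPassB (l : List (Int × Int)) (st : List Int × PySem.Set Int × Bool) :
    List Int × PySem.Set Int × Bool :=
  l.foldl
    (fun st p =>
      if PySem.Set.contains st.2.1 p.1 != PySem.Set.contains st.2.1 p.2 then
        (st.1 ++ [if PySem.Set.contains st.2.1 p.1 then p.2 else p.1],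
         PySem.Set.add st.2.1 (if PySem.Set.contains st.2.1 p.1 then p.2 else p.1),
         true)
      else st)
    st

-- 'while changed:' — fuel is a totality guard only: each pass that reports a change
-- appends at least one new vertex, and at most 2*len(roads) vertices can ever be added,
-- so the loop always exits by the 'changed = False' branch within the given fuel
def pvLoopB (roads : List (Int × Int)) : Nat → List Int → PySem.Set Int → List Int
  | 0, reach, _ => reach
  | fuel + 1, reach, inR =>
    let st := pvPassB roads (reach, inR, false)
    if st.2.2 then pvLoopB roads fuel st.1 st.2.1 else st.1

def count_visit_ways_alt (n : Int) (roads : List (Int × Int)) (start_city : Int) : Int :=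
  let deg := pvDegB n roads
  let reach := pvLoopB roads (2 * roads.length + 2) [start_city] (PySem.Set.ofList [start_city])
  -- deg[…] is pvGetI (Python's wraparound list indexing); the fac lookups are exact
  -- under Pre_ (each index is then inside the table)
  let ans := pvFacB.getD (pvGetI deg start_city).toNat 0
  (reach.drop 1).foldl
    (fun a v => PySem.Int.mod (a * pvFacB.getD (pvGetI deg v - 1).toNat 0) pvMOD) ans

-- ===== PRECONDITION & SPEC =====
-- all city labels the input mentions (the start and every road endpoint)
def pvLabels (roads : List (Int × Int)) (s : Int) : List Int :=
  s :: roads.flatMap (fun p => [p.1, p.2])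
-- degree of a label in the road list (self-loops count twice, as in A)
def pvDegCount (roads : List (Int × Int)) (v : Int) : Nat :=
  roads.countP (fun q => q.1 == v) + roads.countP (fun q => q.2 == v)

-- Pre_ restricts to inputs where (1) every label is in [-(n+1), n], the range on which
-- Python list indexing does not raise (negative labels address cell label+n+1 by
-- Python's wraparound, which A's port models); (2) no two DISTINCT labels address the
-- same cell — on such aliased inputs A's value is an artefact of comparing raw labels
-- in one place and array cells in another that no caller would specify; (3) every
-- degree is ≤ 10^5, A's fac table bound, beyond which A raises IndexError.
def Pre_count_visit_ways (n : Int) (roads : List (Int × Int)) (start_city : Int) : Prop :=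
  0 ≤ n ∧
  (∀ x ∈ pvLabels roads start_city, -(n + 1) ≤ x ∧ x ≤ n) ∧
  (∀ x ∈ pvLabels roads start_city, ∀ y ∈ pvLabels roads start_city,
    pvCell (n + 1).toNat x = pvCell (n + 1).toNat y → x = y) ∧
  (∀ p ∈ roads, pvDegCount roads p.1 ≤ 100000 ∧ pvDegCount roads p.2 ≤ 100000)
instance (n : Int) (roads : List (Int × Int)) (start_city : Int) : Decidable (Pre_count_visit_ways n roads start_city) := by unfold Pre_count_visit_ways; infer_instance

def pvWitness_count_visit_ways : Int × (List (Int × Int)) × Int := (3, [(0, 1), (1, 2)], 0)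

def Spec_count_visit_ways (n : Int) (roads : List (Int × Int)) (start_city : Int) (out : Int) : Prop := out = count_visit_ways_alt n roads start_city
instance (n : Int) (roads : List (Int × Int)) (start_city : Int) (out : Int) : Decidable (Spec_count_visit_ways n roads start_city out) := by unfold Spec_count_visit_ways; infer_instance

-- ===== CLAIM (what is proved, stated in full; the proofs are below) =====
def Claim_equal_count_visit_ways : Prop := ∀ (n : Int) (roads : List (Int × Int)) (start_city : Int), Dom_count_visit_ways n roads start_city → Pre_count_visit_ways n roads start_city → Spec_count_visit_ways n roads start_city (count_visit_ways n roads start_city)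

-- ===== LEMMAS AND PROOFS =====

-- 'index in Python's non-raising range'
def pvInB (sz : Nat) (i : Int) : Prop := -(sz : Int) ≤ i ∧ i < (sz : Int)

-- the undirected edge relation of the road list, on raw labels
def pvAdj (roads : List (Int × Int)) (u w : Int) : Prop :=
  ∃ p ∈ roads, (p.1 = u ∧ p.2 = w) ∨ (p.2 = u ∧ p.1 = w)

-- connectivity from the start (B's fixpoint and A's DFS both compute exactly this set)
def pvConn (roads : List (Int × Int)) (s w : Int) : Prop :=
  Relation.ReflTransGen (pvAdj roads) s w

-- array cell arithmetic
theorem pvCell_nonneg_id (sz : Nat) (c : Int) (h : 0 ≤ c) : pvCell sz c = c := by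
  rw [pvCell, if_neg (by omega)]

theorem pvSize_setI (xs : Array Int) (i v : Int) : (pvSetI xs i v).size = xs.size := by
  unfold pvSetI; split_ifs <;> simp

theorem pvSize_setL (xs : Array (List Int)) (i : Int) (v : List Int) :
    (pvSetL xs i v).size = xs.size := by
  unfold pvSetL; split_ifs <;> simp

theorem pvGetI_congr (xs : Array Int) (a b : Int)
    (h : pvCell xs.size a = pvCell xs.size b) : pvGetI xs a = pvGetI xs b := by
  unfold pvGetI; rw [h]

theorem pvGetL_congr (xs : Array (List Int)) (a b : Int)
    (h : pvCell xs.size a = pvCell xs.size b) : pvGetL xs a = pvGetL xs b := by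
  unfold pvGetL; rw [h]

theorem pvGetI_setI (xs : Array Int) (i c v : Int)
    (hi : pvInB xs.size i) (hc : pvInB xs.size c) :
    pvGetI (pvSetI xs i v) c =
      if pvCell xs.size i = pvCell xs.size c then v else pvGetI xs c := by
  obtain ⟨hi0, hi1⟩ := pvCell_bounds xs.size i hi.1 hi.2
  obtain ⟨hc0, hc1⟩ := pvCell_bounds xs.size c hc.1 hc.2
  unfold pvGetI pvSetI
  rw [if_pos hi.1, Array.size_setIfInBounds, Array.getD_eq_getD_getElem?,
    Array.getD_eq_getD_getElem?, Array.getElem?_setIfInBounds]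
  split_ifs <;> simp_all <;> omega

theorem pvGetL_setL (xs : Array (List Int)) (i c : Int) (v : List Int)
    (hi : pvInB xs.size i) (hc : pvInB xs.size c) :
    pvGetL (pvSetL xs i v) c =
      if pvCell xs.size i = pvCell xs.size c then v else pvGetL xs c := by
  obtain ⟨hi0, hi1⟩ := pvCell_bounds xs.size i hi.1 hi.2
  obtain ⟨hc0, hc1⟩ := pvCell_bounds xs.size c hc.1 hc.2
  unfold pvGetL pvSetL
  rw [if_pos hi.1, Array.size_setIfInBounds, Array.getD_eq_getD_getElem?,
    Array.getD_eq_getD_getElem?, Array.getElem?_setIfInBounds]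
  split_ifs <;> simp_all <;> omega

theorem pvGetI_set_cases (xs : Array Int) (i v c : Int) :
    pvGetI (pvSetI xs i v) c = v ∨ pvGetI (pvSetI xs i v) c = pvGetI xs c := by
  unfold pvGetI pvSetI
  split_ifs
  · rw [Array.size_setIfInBounds, Array.getD_eq_getD_getElem?,
      Array.getD_eq_getD_getElem?, Array.getElem?_setIfInBounds]
    split_ifs <;> simp_all
  · right; rfl

theorem pvGetI_replicate (m : Nat) (c : Int) : pvGetI (Array.replicate m (0 : Int)) c = 0 := by
  simp only [pvGetI, Array.getD_eq_getD_getElem?, Array.getElem?_replicate, Array.size_replicate]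
  split <;> simp

theorem pvGetL_replicate (m : Nat) (c : Int) : pvGetL (Array.replicate m ([] : List Int)) c = [] := by
  simp only [pvGetL, Array.getD_eq_getD_getElem?, Array.getElem?_replicate, Array.size_replicate]
  split <;> simp

-- ---------- A's DFS re-expressed as a pure collect-then-fold (proof-side helpers) ----------

-- the same traversal as A's dfs but only marking/pushing, collecting pop order
def pvScanB (gp : Array (List Int)) (nbrs : List Int)
    (vis : Array Int) (stack : List Int) : Array Int × List Int :=
  match nbrs with
  | [] => (vis, stack)
  | i :: rest =>
    if -(vis.size : Int) ≤ i ∧ i < (vis.size : Int) ∧ pvGetI vis i = 0 then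
      pvScanB gp rest (pvSetI vis i 1) (i :: stack)
    else pvScanB gp rest vis stack

theorem pvScanB_measure (gp : Array (List Int)) (nbrs : List Int)
    (vis : Array Int) (stack : List Int) :
    2 * pvZ (pvScanB gp nbrs vis stack).1 +
      (pvScanB gp nbrs vis stack).2.length ≤ 2 * pvZ vis + stack.length := by
  induction nbrs generalizing vis stack with
  | nil => simp [pvScanB]
  | cons i rest ih =>
    simp only [pvScanB]
    split
    · rename_i h
      have hz := pvZ_setOne_lt vis i h.1 h.2.1 h.2.2
      have := ih (pvSetI vis i 1) (i :: stack)
      simp only [List.length_cons] at this ⊢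
      omega
    · exact ih vis stack

def pvCollectB (gp : Array (List Int)) (stack : List Int) (vis : Array Int)
    (comp : List Int) : List Int :=
  match stack with
  | [] => comp
  | v :: rest =>
    let r := pvScanB gp (pvGetL gp v) vis rest
    pvCollectB gp r.2 r.1 (comp ++ [v])
termination_by 2 * pvZ vis + stack.length
decreasing_by
  have h := pvScanB_measure gp (pvGetL gp v) vis rest
  simp only [List.length_cons]
  omega

-- the arithmetic step: ans = ans * fac[d] % MOD with d = deg0[v] (start) or deg0[v]-1
def pvStep (deg0 : Array Int) (s : Int) (a v : Int) : Int :=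
  PySem.Int.mod (a * pvFacA.getD (if v = s then pvGetI deg0 v else pvGetI deg0 v - 1).toNat 0) pvMOD

-- invariants of the lockstep simulation.  P is the set of raw labels the input uses;
-- Pre_'s alias-freeness makes 'same cell' and 'same label' agree on P.
def GInvW (P : Int → Prop) (gp : Array (List Int)) : Prop :=
  ∀ c : Int, pvInB gp.size c → ∀ i ∈ pvGetL gp c,
    pvInB gp.size i ∧ P i ∧
    ∃ x, P x ∧ pvInB gp.size x ∧ pvCell gp.size x = pvCell gp.size c ∧ x ∈ pvGetL gp i

def SInvW (P : Int → Prop) (vis : Array Int) (stack : List Int) : Prop :=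
  ∀ v ∈ stack, P v ∧ pvInB vis.size v ∧ pvGetI vis v ≠ 0

def DInv (s : Int) (deg0 vis deg : Array Int) : Prop :=
  ∀ c : Int, 0 ≤ c → c < (deg.size : Int) →
    pvGetI deg c = pvGetI deg0 c -
      (if pvGetI vis c ≠ 0 ∧ c ≠ pvCell deg.size s then 1 else 0)

theorem pvScanA_main (gp : Array (List Int)) (vertex : Int) (nbrs : List Int)
    (vis deg : Array Int) (stack : List Int) (P : Int → Prop) (s : Int) (deg0 : Array Int)
    (halias : ∀ x y, P x → P y → pvCell gp.size x = pvCell gp.size y → x = y)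
    (hg : GInvW P gp) (hsz1 : vis.size = gp.size) (hsz2 : deg.size = gp.size)
    (hPv : P vertex) (hv : pvInB gp.size vertex)
    (hnb : ∀ i ∈ nbrs, i ∈ pvGetL gp vertex)
    (hs : pvGetI vis s ≠ 0)
    (hst : SInvW P vis stack) (hd : DInv s deg0 vis deg) :
    pvScanB gp nbrs vis stack =
      ((pvScanA gp vertex nbrs vis deg stack).1, (pvScanA gp vertex nbrs vis deg stack).2.2) ∧
    (pvScanA gp vertex nbrs vis deg stack).1.size = vis.size ∧
    (pvScanA gp vertex nbrs vis deg stack).2.1.size = deg.size ∧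
    (∀ c : Int, pvGetI vis c ≠ 0 → pvGetI (pvScanA gp vertex nbrs vis deg stack).1 c ≠ 0) ∧
    SInvW P (pvScanA gp vertex nbrs vis deg stack).1 (pvScanA gp vertex nbrs vis deg stack).2.2 ∧
    DInv s deg0 (pvScanA gp vertex nbrs vis deg stack).1 (pvScanA gp vertex nbrs vis deg stack).2.1 := by
  induction nbrs generalizing vis deg stack with
  | nil => exact ⟨rfl, rfl, rfl, fun c h => h, hst, hd⟩
  | cons i rest ih =>
    simp only [pvScanA, pvScanB]
    by_cases hcnd : -(vis.size : Int) ≤ i ∧ i < (vis.size : Int) ∧ pvGetI vis i = 0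
    · obtain ⟨hiL, hiU, hiz⟩ := hcnd
      rw [if_pos ⟨hiL, hiU, hiz⟩, if_pos ⟨hiL, hiU, hiz⟩]
      have hmem : i ∈ pvGetL gp vertex := hnb i List.mem_cons_self
      obtain ⟨hiB, hPi, x, hPx, hxB, hxcell, hxmem⟩ := hg vertex hv i hmem
      have hxv : x = vertex := halias x vertex hPx hPv hxcell
      subst hxv
      rw [if_pos hxmem]
      have hiBv : pvInB vis.size i := ⟨hiL, hiU⟩
      have hiBd : pvInB deg.size i := by rw [hsz2]; exact hiB
      have hszv : (pvSetI vis i 1).size = vis.size := pvSize_setI _ _ _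
      have hszd : (pvSetI deg i (pvGetI deg i - 1)).size = deg.size := pvSize_setI _ _ _
      have hmono : ∀ c : Int, pvGetI vis c ≠ 0 → pvGetI (pvSetI vis i 1) c ≠ 0 := by
        intro c h
        rcases pvGetI_set_cases vis i 1 c with hcase | hcase
        · rw [hcase]; norm_num
        · rw [hcase]; exact h
      have hs' : pvGetI (pvSetI vis i 1) s ≠ 0 := hmono s hs
      have hst' : SInvW P (pvSetI vis i 1) (i :: stack) := by
        intro v hv'
        rcases List.mem_cons.mp hv' with h | h
        · rw [h]
          refine ⟨hPi, by rw [hszv]; exact hiBv, ?_⟩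
          rw [pvGetI_setI vis i i 1 hiBv hiBv, if_pos rfl]
          norm_num
        · obtain ⟨h1, h2, h3⟩ := hst v h
          exact ⟨h1, by rw [hszv]; exact h2, hmono v h3⟩
      have hd' : DInv s deg0 (pvSetI vis i 1) (pvSetI deg i (pvGetI deg i - 1)) := by
        intro c hc0 hcLt
        rw [hszd] at hcLt
        have hcBd : pvInB deg.size c := ⟨by omega, hcLt⟩
        have hcBv : pvInB vis.size c := by
          constructor <;> [omega; (rw [hsz1]; rw [hsz2] at hcLt; exact hcLt)]
        have hcc : pvCell deg.size c = c := pvCell_nonneg_id _ c hc0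
        have hccv : pvCell vis.size c = c := pvCell_nonneg_id _ c hc0
        rw [pvGetI_setI deg i c _ hiBd hcBd, pvGetI_setI vis i c 1 hiBv hcBv]
        have hcells : pvCell deg.size i = pvCell vis.size i := by
          rw [hsz1, hsz2]
        rw [show pvCell (pvSetI deg i (pvGetI deg i - 1)).size s = pvCell deg.size s by
          rw [hszd]]
        have hvsz' : vis.size = deg.size := by rw [hsz1, hsz2]
        by_cases hci : pvCell deg.size i = c
        · have hcs : c ≠ pvCell deg.size s := by
            intro h
            apply hs
            have e1 : pvGetI vis s = pvGetI vis c :=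
              pvGetI_congr vis s c (by rw [hccv, h, hvsz'])
            have e2 : pvGetI vis c = pvGetI vis i := by
              apply pvGetI_congr vis c i
              rw [hccv, ← hcells]
              exact hci.symm
            rw [e1, e2]
            exact hiz
          have hinner : (if pvCell vis.size i = pvCell vis.size c then (1 : Int)
              else pvGetI vis c) = 1 :=
            if_pos (by rw [hccv, ← hcells]; exact hci)
          rw [if_pos (by rw [hcc]; exact hci), hinner, if_pos ⟨by norm_num, hcs⟩]
          have hreadd : pvGetI deg c = pvGetI deg i :=
            pvGetI_congr deg c i (by rw [hcc]; exact hci.symm)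
          have hreadv : pvGetI vis c = pvGetI vis i := by
            apply pvGetI_congr vis c i
            rw [hccv, ← hcells]
            exact hci.symm
          have hold := hd c hc0 hcLt
          rw [hreadv, hiz] at hold
          simp only [ne_eq, not_true_eq_false, false_and, if_false] at hold
          omega
        · have hinner : (if pvCell vis.size i = pvCell vis.size c then (1 : Int)
              else pvGetI vis c) = pvGetI vis c :=
            if_neg (by rw [hccv, ← hcells]; exact hci)
          rw [if_neg (by rw [hcc]; exact hci), hinner]
          exact hd c hc0 hcLt
      obtain ⟨e1, e2, e3, e4, e5, e6⟩ := ih (vis := pvSetI vis i 1)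
        (deg := pvSetI deg i (pvGetI deg i - 1)) (stack := i :: stack)
        (hnb := fun j hj => hnb j (List.mem_cons_of_mem _ hj))
        (hsz1 := by rw [hszv, hsz1]) (hsz2 := by rw [hszd, hsz2])
        (hs := hs') (hst := hst') (hd := hd')
      exact ⟨e1, e2.trans hszv, e3.trans hszd, fun c h => e4 c (hmono c h), e5, e6⟩
    · rw [if_neg hcnd, if_neg hcnd]
      exact ih (vis := vis) (deg := deg) (stack := stack)
        (hnb := fun j hj => hnb j (List.mem_cons_of_mem _ hj))
        (hsz1 := hsz1) (hsz2 := hsz2) (hs := hs) (hst := hst) (hd := hd)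

theorem pvCollectB_append (N : Nat) : ∀ (gp : Array (List Int)) (stack : List Int)
    (vis : Array Int) (comp : List Int), 2 * pvZ vis + stack.length ≤ N →
    pvCollectB gp stack vis comp = comp ++ pvCollectB gp stack vis [] := by
  induction N using Nat.strong_induction_on with
  | _ N ih =>
    intro gp stack vis comp hN
    cases stack with
    | nil => simp [pvCollectB]
    | cons v rest =>
      rw [pvCollectB, pvCollectB]
      have hm := pvScanB_measure gp (pvGetL gp v) vis rest
      have hN1 : 1 ≤ N := by simp only [List.length_cons] at hN; omega
      have hle : 2 * pvZ (pvScanB gp (pvGetL gp v) vis rest).1 +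
          (pvScanB gp (pvGetL gp v) vis rest).2.length ≤ N - 1 := by
        simp only [List.length_cons] at hN; omega
      rw [ih (N - 1) (by omega) gp _ _ (comp ++ [v]) hle,
        ih (N - 1) (by omega) gp _ _ ([] ++ [v]) hle]
      simp

theorem pvStep_bounds (deg0 : Array Int) (s : Int) (l : List Int) (a : Int)
    (h0 : 0 ≤ a) (h1 : a < pvMOD) :
    0 ≤ l.foldl (pvStep deg0 s) a ∧ l.foldl (pvStep deg0 s) a < pvMOD := by
  induction l generalizing a with
  | nil => exact ⟨h0, h1⟩
  | cons x xs ih =>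
    simp only [List.foldl_cons]
    exact ih _ (PySem.Int.mod_nonneg _ (by norm_num [pvMOD]))
      (PySem.Int.mod_lt _ (by norm_num [pvMOD]))

theorem pvDfs_eq (N : Nat) : ∀ (gp : Array (List Int)) (deg0 : Array Int)
    (P : Int → Prop) (s : Int) (vis deg : Array Int) (stack : List Int) (ans : Int),
    2 * pvZ vis + stack.length ≤ N →
    (∀ x y, P x → P y → pvCell gp.size x = pvCell gp.size y → x = y) →
    GInvW P gp → vis.size = gp.size → deg.size = gp.size → deg0.size = gp.size →
    P s → pvInB gp.size s → pvGetI vis s ≠ 0 → SInvW P vis stack → DInv s deg0 vis deg →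
    0 ≤ ans → ans < pvMOD →
    pvDfsA gp stack vis deg ans =
      (pvCollectB gp stack vis []).foldl (pvStep deg0 s) ans := by
  induction N using Nat.strong_induction_on with
  | _ N ih =>
    intro gp deg0 P s vis deg stack ans hN halias hg hsz1 hsz2 hsz0 hPs hsB hs hst hd ha0 ha1
    have hMpos : (0 : Int) < pvMOD := by norm_num [pvMOD]
    cases stack with
    | nil =>
      rw [pvDfsA, pvCollectB]
      simp only [List.foldl_nil]
      rw [PySem.Int.mod_eq_emod_of_pos hMpos]
      exact Int.emod_eq_of_lt ha0 ha1
    | cons vertex rest =>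
      obtain ⟨hPv, hvB, hvnz⟩ := hst vertex List.mem_cons_self
      have hvBg : pvInB gp.size vertex := by rw [← hsz1]; exact hvB
      have hst' : SInvW P vis rest := fun v hv => hst v (List.mem_cons_of_mem _ hv)
      obtain ⟨e1, e2, e3, e4, e5, e6⟩ := pvScanA_main gp vertex (pvGetL gp vertex)
        vis deg rest P s deg0 halias hg hsz1 hsz2 hPv hvBg (fun i hi => hi) hs hst' hd
      have hmA := pvScanA_measure gp vertex (pvGetL gp vertex) vis deg rest
      have hle : 2 * pvZ (pvScanA gp vertex (pvGetL gp vertex) vis deg rest).1 +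
          (pvScanA gp vertex (pvGetL gp vertex) vis deg rest).2.2.length ≤ N - 1 := by
        simp only [List.length_cons] at hN; omega
      have hN1 : 1 ≤ N := by simp only [List.length_cons] at hN; omega
      -- the popped value A multiplies in equals B's closed-form term
      have hvc0 : 0 ≤ pvCell deg.size vertex :=
        (pvCell_bounds deg.size vertex (by rw [hsz2, ← hsz1]; exact hvB.1)
          (by rw [hsz2, ← hsz1]; exact hvB.2)).1
      have hvc1 : pvCell deg.size vertex < (deg.size : Int) :=
        (pvCell_bounds deg.size vertex (by rw [hsz2, ← hsz1]; exact hvB.1)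
          (by rw [hsz2, ← hsz1]; exact hvB.2)).2
      have hdv := hd (pvCell deg.size vertex) hvc0 hvc1
      have hreadd : pvGetI deg (pvCell deg.size vertex) = pvGetI deg vertex :=
        pvGetI_congr deg _ vertex (pvCell_nonneg_id _ _ hvc0)
      have hreadd0 : pvGetI deg0 (pvCell deg.size vertex) = pvGetI deg0 vertex :=
        pvGetI_congr deg0 _ vertex (by
          rw [pvCell_nonneg_id deg0.size _ hvc0, hsz2, hsz0])
      have hreadv : pvGetI vis (pvCell deg.size vertex) = pvGetI vis vertex :=
        pvGetI_congr vis _ vertex (by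
          rw [pvCell_nonneg_id vis.size _ hvc0, hsz1, hsz2])
      have hdeg : pvGetI deg vertex =
          (if vertex = s then pvGetI deg0 vertex else pvGetI deg0 vertex - 1) := by
        rw [hreadd, hreadd0, hreadv] at hdv
        by_cases h : vertex = s
        · rw [if_pos h, hdv, if_neg (fun hx => hx.2 (by rw [h]))]
          ring
        · have hne : pvCell deg.size vertex ≠ pvCell deg.size s := by
            intro hcellEq
            apply h
            apply halias vertex s hPv hPs
            rw [show pvCell gp.size vertex = pvCell deg.size vertex by rw [hsz2],
              show pvCell gp.size s = pvCell deg.size s by rw [hsz2], hcellEq]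
          rw [if_neg h, hdv, if_pos ⟨hvnz, hne⟩]
      have hmod : PySem.Int.mod ans pvMOD = ans := by
        rw [PySem.Int.mod_eq_emod_of_pos hMpos]; exact Int.emod_eq_of_lt ha0 ha1
      have hcollapse : ∀ x : Int,
          PySem.Int.mod (PySem.Int.mod x pvMOD) pvMOD = PySem.Int.mod x pvMOD := by
        intro x
        rw [PySem.Int.mod_eq_emod_of_pos hMpos, PySem.Int.mod_eq_emod_of_pos hMpos]
        exact Int.emod_emod_of_dvd x dvd_rfl
      have hstep : PySem.Int.mod (PySem.Int.mod (PySem.Int.mod ans pvMOD *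
            pvFacA.getD (pvGetI deg vertex).toNat 0) pvMOD) pvMOD =
          pvStep deg0 s ans vertex := by
        rw [hcollapse, hmod, pvStep, hdeg]
      simp only [pvDfsA]
      rw [hstep]
      rw [ih (N - 1) (by omega) gp deg0 P s _ _ _ _ hle halias hg (e2.trans hsz1)
        (e3.trans hsz2) hsz0 hPs hsB (e4 s hs) e5 e6
        (show 0 ≤ pvStep deg0 s ans vertex from PySem.Int.mod_nonneg _ hMpos)
        (show pvStep deg0 s ans vertex < pvMOD from PySem.Int.mod_lt _ hMpos)]
      rw [pvCollectB, e1]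
      rw [pvCollectB_append (N - 1) gp _ _ ([] ++ [vertex]) (by simpa using hle)]
      simp [pvStep]

theorem pvBuild_aux (l : List (Int × Int)) : ∀ (g : Array (List Int)) (d : Array Int),
    ((l.foldl
      (fun gd p =>
        (pvSetL (pvSetL gd.1 p.1 (pvGetL gd.1 p.1 ++ [p.2])) p.2
           (pvGetL (pvSetL gd.1 p.1 (pvGetL gd.1 p.1 ++ [p.2])) p.2 ++ [p.1]),
         pvSetI (pvSetI gd.2 p.1 (pvGetI gd.2 p.1 + 1)) p.2
           (pvGetI (pvSetI gd.2 p.1 (pvGetI gd.2 p.1 + 1)) p.2 + 1)))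
      (g, d)).1.size = g.size) ∧
    ((l.foldl
      (fun gd p =>
        (pvSetL (pvSetL gd.1 p.1 (pvGetL gd.1 p.1 ++ [p.2])) p.2
           (pvGetL (pvSetL gd.1 p.1 (pvGetL gd.1 p.1 ++ [p.2])) p.2 ++ [p.1]),
         pvSetI (pvSetI gd.2 p.1 (pvGetI gd.2 p.1 + 1)) p.2
           (pvGetI (pvSetI gd.2 p.1 (pvGetI gd.2 p.1 + 1)) p.2 + 1)))
      (g, d)).2.size = d.size) := by
  induction l with
  | nil => intro g d; exact ⟨rfl, rfl⟩
  | cons p rest ih =>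
    intro g d
    simp only [List.foldl_cons]
    obtain ⟨h1, h2⟩ := ih _ _
    constructor
    · rw [h1, pvSize_setL, pvSize_setL]
    · rw [h2, pvSize_setI, pvSize_setI]

theorem pvBuild_size (n : Int) (roads : List (Int × Int)) :
    (pvBuildA n roads).1.size = (n + 1).toNat ∧ (pvBuildA n roads).2.size = (n + 1).toNat := by
  obtain ⟨h1, h2⟩ := pvBuild_aux roads (Array.replicate (n + 1).toNat ([] : List Int))
    (Array.replicate (n + 1).toNat (0 : Int))
  rw [pvBuildA]
  exact ⟨by rw [h1, Array.size_replicate], by rw [h2, Array.size_replicate]⟩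

theorem pvMem_edge (g : Array (List Int)) (a b : Int)
    (ha : pvInB g.size a) (hb : pvInB g.size b) (c i : Int) (hc : pvInB g.size c) :
    i ∈ pvGetL (pvSetL (pvSetL g a (pvGetL g a ++ [b])) b
        (pvGetL (pvSetL g a (pvGetL g a ++ [b])) b ++ [a])) c ↔
      (i ∈ pvGetL g c ∨ (pvCell g.size c = pvCell g.size a ∧ i = b) ∨
        (pvCell g.size c = pvCell g.size b ∧ i = a)) := by
  have hsz : (pvSetL g a (pvGetL g a ++ [b])).size = g.size := pvSize_setL _ _ _
  have hbB : pvInB (pvSetL g a (pvGetL g a ++ [b])).size b := by rw [hsz]; exact hb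
  have hcB : pvInB (pvSetL g a (pvGetL g a ++ [b])).size c := by rw [hsz]; exact hc
  rw [pvGetL_setL _ b c _ hbB hcB, hsz, pvGetL_setL g a b _ ha hb, pvGetL_setL g a c _ ha hc]
  by_cases hcb : pvCell g.size c = pvCell g.size b
  · rw [if_pos hcb.symm]
    by_cases hab : pvCell g.size a = pvCell g.size b
    · rw [if_pos hab]
      have hca : pvGetL g c = pvGetL g a := pvGetL_congr g c a (by rw [hcb, ← hab])
      rw [hca]
      simp only [List.mem_append, List.mem_singleton]
      have h1 : pvCell g.size c = pvCell g.size a := by rw [hcb, ← hab]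
      tauto
    · rw [if_neg hab]
      have hcb' : pvGetL g c = pvGetL g b := pvGetL_congr g c b hcb
      rw [hcb']
      simp only [List.mem_append, List.mem_singleton]
      have h2 : ¬(pvCell g.size c = pvCell g.size a) := fun h => hab (by rw [← h, hcb])
      tauto
  · rw [if_neg (fun h => hcb h.symm)]
    by_cases hca : pvCell g.size c = pvCell g.size a
    · rw [if_pos hca.symm]
      have hca' : pvGetL g c = pvGetL g a := pvGetL_congr g c a hca
      rw [hca']
      simp only [List.mem_append, List.mem_singleton]
      tauto
    · rw [if_neg (fun h => hca h.symm)]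
      tauto

theorem pvBuild_ginv_aux (P : Int → Prop) (l : List (Int × Int)) :
    ∀ (g : Array (List Int)) (d : Array Int),
    GInvW P g →
    (∀ p ∈ l, pvInB g.size p.1 ∧ pvInB g.size p.2 ∧ P p.1 ∧ P p.2) →
    GInvW P ((l.foldl
      (fun gd p =>
        (pvSetL (pvSetL gd.1 p.1 (pvGetL gd.1 p.1 ++ [p.2])) p.2
           (pvGetL (pvSetL gd.1 p.1 (pvGetL gd.1 p.1 ++ [p.2])) p.2 ++ [p.1]),
         pvSetI (pvSetI gd.2 p.1 (pvGetI gd.2 p.1 + 1)) p.2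
           (pvGetI (pvSetI gd.2 p.1 (pvGetI gd.2 p.1 + 1)) p.2 + 1)))
      (g, d)).1) := by
  induction l with
  | nil => intro g d hg _; exact hg
  | cons p rest ih =>
    intro g d hg hb
    obtain ⟨haB, hbB, hPa, hPb⟩ := hb p List.mem_cons_self
    simp only [List.foldl_cons]
    have hsz2 : (pvSetL (pvSetL g p.1 (pvGetL g p.1 ++ [p.2])) p.2
        (pvGetL (pvSetL g p.1 (pvGetL g p.1 ++ [p.2])) p.2 ++ [p.1])).size = g.size := by
      rw [pvSize_setL, pvSize_setL]
    apply ih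
    · intro c hcB i hi
      rw [hsz2] at hcB
      rw [pvMem_edge g p.1 p.2 haB hbB c i hcB] at hi
      rcases hi with h | ⟨h1, h2⟩ | ⟨h1, h2⟩
      · obtain ⟨hiB, hPi, x, hPx, hxB, hxc, hxm⟩ := hg c hcB i h
        refine ⟨by rw [hsz2]; exact hiB, hPi, x, hPx, by rw [hsz2]; exact hxB, ?_, ?_⟩
        · rw [hsz2]; exact hxc
        · exact (pvMem_edge g p.1 p.2 haB hbB i x hiB).mpr (Or.inl hxm)
      · subst h2
        refine ⟨by rw [hsz2]; exact hbB, hPb, p.1, hPa, by rw [hsz2]; exact haB, ?_, ?_⟩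
        · rw [hsz2, h1]
        · exact (pvMem_edge g p.1 p.2 haB hbB p.2 p.1 hbB).mpr (Or.inr (Or.inr ⟨rfl, rfl⟩))
      · subst h2
        refine ⟨by rw [hsz2]; exact haB, hPa, p.2, hPb, by rw [hsz2]; exact hbB, ?_, ?_⟩
        · rw [hsz2, h1]
        · exact (pvMem_edge g p.1 p.2 haB hbB p.1 p.2 haB).mpr (Or.inr (Or.inl ⟨rfl, rfl⟩))
    · intro q hq
      rw [hsz2]
      exact hb q (List.mem_cons_of_mem _ hq)

theorem pvBuild_ginv (P : Int → Prop) (n : Int) (roads : List (Int × Int))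
    (hr : ∀ p ∈ roads, pvInB (n + 1).toNat p.1 ∧ pvInB (n + 1).toNat p.2 ∧ P p.1 ∧ P p.2) :
    GInvW P (pvBuildA n roads).1 := by
  rw [pvBuildA]
  apply pvBuild_ginv_aux
  · intro c hcB i hi
    rw [pvGetL_replicate] at hi
    simp at hi
  · intro p hp
    rw [Array.size_replicate]
    exact hr p hp

-- ---------- adjacency / degree characterizations of A's arrays ----------

theorem pvBuild_adj_aux (l : List (Int × Int)) : ∀ (g : Array (List Int)) (d : Array Int),
    (∀ p ∈ l, pvInB g.size p.1 ∧ pvInB g.size p.2) →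
    ∀ c, pvInB g.size c → ∀ i,
    (i ∈ pvGetL ((l.foldl
      (fun gd p =>
        (pvSetL (pvSetL gd.1 p.1 (pvGetL gd.1 p.1 ++ [p.2])) p.2
           (pvGetL (pvSetL gd.1 p.1 (pvGetL gd.1 p.1 ++ [p.2])) p.2 ++ [p.1]),
         pvSetI (pvSetI gd.2 p.1 (pvGetI gd.2 p.1 + 1)) p.2
           (pvGetI (pvSetI gd.2 p.1 (pvGetI gd.2 p.1 + 1)) p.2 + 1)))
      (g, d)).1) c ↔
      (i ∈ pvGetL g c ∨ ∃ p ∈ l,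
        (pvCell g.size c = pvCell g.size p.1 ∧ i = p.2) ∨
        (pvCell g.size c = pvCell g.size p.2 ∧ i = p.1))) := by
  induction l with
  | nil =>
    intro g d _ c _ i
    simp
  | cons p rest ih =>
    intro g d hb c hc i
    obtain ⟨haB, hbB⟩ := hb p List.mem_cons_self
    simp only [List.foldl_cons]
    have hszg : (pvSetL (pvSetL g p.1 (pvGetL g p.1 ++ [p.2])) p.2
        (pvGetL (pvSetL g p.1 (pvGetL g p.1 ++ [p.2])) p.2 ++ [p.1])).size = g.size := by
      rw [pvSize_setL, pvSize_setL]
    have hres := ih (pvSetL (pvSetL g p.1 (pvGetL g p.1 ++ [p.2])) p.2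
        (pvGetL (pvSetL g p.1 (pvGetL g p.1 ++ [p.2])) p.2 ++ [p.1]))
      (pvSetI (pvSetI d p.1 (pvGetI d p.1 + 1)) p.2
        (pvGetI (pvSetI d p.1 (pvGetI d p.1 + 1)) p.2 + 1)) (by
        intro q hq
        rw [hszg]
        exact hb q (List.mem_cons_of_mem _ hq)) c (by rw [hszg]; exact hc) i
    simp only [hszg] at hres
    rw [hres, pvMem_edge g p.1 p.2 haB hbB c i hc]
    simp only [List.mem_cons]
    constructor
    · rintro (((h | h | h) | ⟨q, hq, h⟩))
      · exact Or.inl h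
      · exact Or.inr ⟨p, Or.inl rfl, Or.inl h⟩
      · exact Or.inr ⟨p, Or.inl rfl, Or.inr h⟩
      · exact Or.inr ⟨q, Or.inr hq, h⟩
    · rintro (h | ⟨q, (hq | hq), h⟩)
      · exact Or.inl (Or.inl h)
      · subst hq
        exact Or.inl (Or.inr h)
      · exact Or.inr ⟨q, hq, h⟩

-- ---------- membership of the DFS pop-order list = connectivity ----------

theorem pvAdj_mem_labels (roads : List (Int × Int)) (s u w : Int) (h : pvAdj roads u w) :
    w ∈ pvLabels roads s := by
  obtain ⟨p, hp, hc⟩ := h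
  rcases hc with ⟨_, h2⟩ | ⟨_, h2⟩ <;> subst h2 <;>
    exact List.mem_cons_of_mem _ (List.mem_flatMap.mpr ⟨p, hp, by simp⟩)

theorem pvScanB_main (gp : Array (List Int)) (M : Int → Prop) (nbrs : List Int)
    (vis : Array Int) (stack : List Int)
    (halias : ∀ x y, M x → M y → pvCell vis.size x = pvCell vis.size y → x = y)
    (hinB : ∀ w, M w → pvInB vis.size w)
    (hnbrs : ∀ i ∈ nbrs, M i)
    (hstkM : ∀ w ∈ stack, M w)
    (hstkV : ∀ w ∈ stack, pvGetI vis w ≠ 0)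
    (hnd : stack.Nodup) :
    (pvScanB gp nbrs vis stack).1.size = vis.size ∧
    (∀ w, pvGetI vis w ≠ 0 → pvGetI (pvScanB gp nbrs vis stack).1 w ≠ 0) ∧
    (∀ w, M w → (pvGetI (pvScanB gp nbrs vis stack).1 w ≠ 0 ↔ pvGetI vis w ≠ 0 ∨ w ∈ nbrs)) ∧
    (∀ w, M w → (w ∈ (pvScanB gp nbrs vis stack).2 ↔
        w ∈ stack ∨ (w ∈ nbrs ∧ pvGetI vis w = 0))) ∧
    (∀ w ∈ (pvScanB gp nbrs vis stack).2, M w) ∧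
    (∀ w ∈ (pvScanB gp nbrs vis stack).2, pvGetI (pvScanB gp nbrs vis stack).1 w ≠ 0) ∧
    (pvScanB gp nbrs vis stack).2.Nodup := by
  induction nbrs generalizing vis stack with
  | nil =>
    refine ⟨rfl, fun w h => h, ?_, ?_, hstkM, hstkV, hnd⟩
    · intro w _
      rw [show pvScanB gp [] vis stack = (vis, stack) from rfl]
      simp
    · intro w _
      rw [show pvScanB gp [] vis stack = (vis, stack) from rfl]
      simp
  | cons i rest ih =>
    have hMi : M i := hnbrs i List.mem_cons_self
    have hiB : pvInB vis.size i := hinB i hMi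
    by_cases hvi : pvGetI vis i = 0
    · rw [pvScanB, if_pos ⟨hiB.1, hiB.2, hvi⟩]
      have hszv : (pvSetI vis i 1).size = vis.size := pvSize_setI _ _ _
      have hone : ∀ w, M w → (pvGetI (pvSetI vis i 1) w ≠ 0 ↔ pvGetI vis w ≠ 0 ∨ w = i) := by
        intro w hw
        rw [pvGetI_setI vis i w 1 hiB (hinB w hw)]
        by_cases hwi : w = i
        · subst hwi
          simp
        · rw [if_neg (fun hc => hwi ((halias w i hw hMi hc.symm)))]
          constructor
          · exact fun h => Or.inl h
          · rintro (h | h)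
            · exact h
            · exact absurd h hwi
      have hmono1 : ∀ w, pvGetI vis w ≠ 0 → pvGetI (pvSetI vis i 1) w ≠ 0 := by
        intro w h
        rcases pvGetI_set_cases vis i 1 w with hc | hc
        · rw [hc]; norm_num
        · rw [hc]; exact h
      have hvi1 : pvGetI (pvSetI vis i 1) i ≠ 0 := by
        rw [pvGetI_setI vis i i 1 hiB hiB, if_pos rfl]
        norm_num
      obtain ⟨g1, g2, g3, g4, g5, g6, g7⟩ := ih (pvSetI vis i 1) (i :: stack)
        (by intro x y hx hy h; exact halias x y hx hy (by rwa [hszv] at h))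
        (by intro w hw; rw [hszv]; exact hinB w hw)
        (fun j hj => hnbrs j (List.mem_cons_of_mem _ hj))
        (by intro w hw; rcases List.mem_cons.mp hw with h | h; · rw [h]; exact hMi
            · exact hstkM w h)
        (by intro w hw; rcases List.mem_cons.mp hw with h | h; · rw [h]; exact hvi1
            · exact hmono1 w (hstkV w h))
        (by exact List.Nodup.cons (fun hmem => hvi1 (by
              rw [show pvGetI (pvSetI vis i 1) i = pvGetI (pvSetI vis i 1) i from rfl]
              exact absurd (hstkV i hmem) (by simp [hvi]))) hnd)
      refine ⟨g1.trans hszv, fun w h => g2 w (hmono1 w h), ?_, ?_, g5, g6, g7⟩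
      · intro w hw
        rw [g3 w hw, hone w hw, List.mem_cons]
        tauto
      · intro w hw
        rw [g4 w hw, List.mem_cons, List.mem_cons]
        have h1 := hone w hw
        by_cases h3 : w = i
        · subst h3
          exact iff_of_true (Or.inl (Or.inl rfl)) (Or.inr ⟨Or.inl rfl, hvi⟩)
        · have h2 : pvGetI (pvSetI vis i 1) w = 0 ↔ pvGetI vis w = 0 := by
            tauto
          rw [h2]
          tauto
    · rw [pvScanB, if_neg (fun h => hvi h.2.2)]
      obtain ⟨g1, g2, g3, g4, g5, g6, g7⟩ := ih vis stack halias hinB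
        (fun j hj => hnbrs j (List.mem_cons_of_mem _ hj)) hstkM hstkV hnd
      refine ⟨g1, g2, ?_, ?_, g5, g6, g7⟩
      · intro w hw
        rw [g3 w hw, List.mem_cons]
        by_cases h3 : w = i
        · subst h3
          simp [hvi]
        · tauto
      · intro w hw
        rw [g4 w hw, List.mem_cons]
        by_cases h3 : w = i
        · subst h3
          simp [hvi]
        · tauto

set_option maxHeartbeats 2000000 in
theorem pvCollectB_main (roads : List (Int × Int)) (s : Int) (N : Nat) :
    ∀ (gp : Array (List Int)) (vis : Array Int) (stack comp : List Int),
    2 * pvZ vis + stack.length ≤ N →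
    (∀ x y, x ∈ pvLabels roads s → y ∈ pvLabels roads s →
      pvCell vis.size x = pvCell vis.size y → x = y) →
    (∀ w, w ∈ pvLabels roads s → pvInB vis.size w) →
    vis.size = gp.size →
    (∀ u, u ∈ pvLabels roads s → pvInB gp.size u → ∀ i, (i ∈ pvGetL gp u ↔ pvAdj roads u i)) →
    (∀ w ∈ comp ++ stack, w ∈ pvLabels roads s) →
    (comp ++ stack).Nodup →
    (∀ w, w ∈ pvLabels roads s → (pvGetI vis w ≠ 0 ↔ w ∈ comp ++ stack)) →
    (∀ v ∈ comp, ∀ w, pvAdj roads v w → pvGetI vis w ≠ 0) →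
    (∀ w ∈ comp ++ stack, pvConn roads s w) →
    ∃ visF : Array Int, visF.size = vis.size ∧
      (pvCollectB gp stack vis comp).Nodup ∧
      (∀ w ∈ pvCollectB gp stack vis comp, w ∈ pvLabels roads s) ∧
      (∀ w, pvGetI vis w ≠ 0 → pvGetI visF w ≠ 0) ∧
      (∀ w, w ∈ pvLabels roads s → (w ∈ pvCollectB gp stack vis comp ↔ pvGetI visF w ≠ 0)) ∧
      (∀ w ∈ pvCollectB gp stack vis comp, pvConn roads s w) ∧
      (∀ v ∈ pvCollectB gp stack vis comp, ∀ w, pvAdj roads v w → pvGetI visF w ≠ 0) := by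
  induction N using Nat.strong_induction_on with
  | _ N ih =>
    intro gp vis stack comp hN halias hinB hszg hgp i1 i2 i3 i4 i5
    cases stack with
    | nil =>
      rw [pvCollectB]
      refine ⟨vis, rfl, by simpa using i2, fun w hw => i1 w (by simpa using hw),
        fun w h => h, ?_, fun w hw => i5 w (by simpa using hw), by simpa using i4⟩
      intro w hw
      rw [i3 w hw]
      simp
    | cons v rest =>
      have hC : pvCollectB gp (v :: rest) vis comp =
          pvCollectB gp (pvScanB gp (pvGetL gp v) vis rest).2
            (pvScanB gp (pvGetL gp v) vis rest).1 (comp ++ [v]) := by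
        rw [pvCollectB]
      rw [hC]
      have hMv : v ∈ pvLabels roads s := i1 v (List.mem_append_right _ List.mem_cons_self)
      have hvB : pvInB vis.size v := hinB v hMv
      have hvBg : pvInB gp.size v := by rw [← hszg]; exact hvB
      have hadj := hgp v hMv hvBg
      have hnbrsM : ∀ i ∈ pvGetL gp v, i ∈ pvLabels roads s := by
        intro i hi
        exact pvAdj_mem_labels roads s v i ((hadj i).mp hi)
      rcases List.nodup_append.mp i2 with ⟨hcnd, hvr, hdisj⟩
      have hvnr : v ∉ rest := (List.nodup_cons.mp hvr).1
      have hrnd : rest.Nodup := (List.nodup_cons.mp hvr).2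
      have hstkM : ∀ w ∈ rest, w ∈ pvLabels roads s := fun w hw =>
        i1 w (List.mem_append_right _ (List.mem_cons_of_mem _ hw))
      have hstkV : ∀ w ∈ rest, pvGetI vis w ≠ 0 := fun w hw =>
        (i3 w (hstkM w hw)).mpr (List.mem_append_right _ (List.mem_cons_of_mem _ hw))
      obtain ⟨s1, s2, s3, s4, s5, s6, s7⟩ := pvScanB_main gp (· ∈ pvLabels roads s)
        (pvGetL gp v) vis rest halias hinB hnbrsM hstkM hstkV hrnd
      have hmeas := pvScanB_measure gp (pvGetL gp v) vis rest
      have hle : 2 * pvZ (pvScanB gp (pvGetL gp v) vis rest).1 +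
          (pvScanB gp (pvGetL gp v) vis rest).2.length ≤ N - 1 := by
        simp only [List.length_cons] at hN
        omega
      have hvvis : pvGetI vis v ≠ 0 :=
        (i3 v hMv).mpr (List.mem_append_right _ List.mem_cons_self)
      -- the invariants for the recursive call
      have i1' : ∀ w ∈ (comp ++ [v]) ++ (pvScanB gp (pvGetL gp v) vis rest).2,
          w ∈ pvLabels roads s := by
        intro w hw
        rcases List.mem_append.mp hw with h | h
        · rcases List.mem_append.mp h with h | h
          · exact i1 w (List.mem_append_left _ h)
          · rw [List.mem_singleton.mp h]; exact hMv
        · exact s5 w h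
      have hstk'char : ∀ w ∈ (pvScanB gp (pvGetL gp v) vis rest).2,
          w ∈ rest ∨ (w ∈ pvGetL gp v ∧ pvGetI vis w = 0) := by
        intro w hw
        exact (s4 w (s5 w hw)).mp hw
      have i2' : ((comp ++ [v]) ++ (pvScanB gp (pvGetL gp v) vis rest).2).Nodup := by
        rw [List.nodup_append]
        refine ⟨?_, s7, ?_⟩
        · rw [List.nodup_append]
          refine ⟨hcnd, List.nodup_singleton v, ?_⟩
          intro a ha b hb
          rw [List.mem_singleton] at hb
          rw [hb]
          exact hdisj a ha v List.mem_cons_self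
        · intro a ha b hb
          intro heq
          subst heq
          rcases hstk'char a hb with h | ⟨_, h0⟩
          · rcases List.mem_append.mp ha with h1 | h1
            · exact hdisj a h1 a (List.mem_cons_of_mem _ h) rfl
            · rw [List.mem_singleton] at h1
              subst h1
              exact hvnr h
          · have hne : pvGetI vis a ≠ 0 := by
              rcases List.mem_append.mp ha with h1 | h1
              · exact (i3 a (i1 a (List.mem_append_left _ h1))).mpr (List.mem_append_left _ h1)
              · rw [List.mem_singleton] at h1
                rw [h1]
                exact hvvis
            exact hne h0
      have i3' : ∀ w, w ∈ pvLabels roads s →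
          (pvGetI (pvScanB gp (pvGetL gp v) vis rest).1 w ≠ 0 ↔
            w ∈ (comp ++ [v]) ++ (pvScanB gp (pvGetL gp v) vis rest).2) := by
        intro w hw
        rw [s3 w hw, i3 w hw]
        simp only [List.mem_append, List.mem_cons, List.mem_singleton]
        rw [s4 w hw]
        by_cases h0 : pvGetI vis w = 0
        · have : ¬ (w ∈ comp ∨ v = w ∨ w ∈ rest) := by
            intro hmem
            exact (i3 w hw).mpr (by
              simp only [List.mem_append, List.mem_cons]
              tauto) h0
          tauto
        · have : w ∈ comp ∨ v = w ∨ w ∈ rest := by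
            have := (i3 w hw).mp h0
            simp only [List.mem_append, List.mem_cons] at this
            tauto
          tauto
      have i4' : ∀ u ∈ comp ++ [v], ∀ w, pvAdj roads u w →
          pvGetI (pvScanB gp (pvGetL gp v) vis rest).1 w ≠ 0 := by
        intro u hu w haw
        have hMw : w ∈ pvLabels roads s := pvAdj_mem_labels roads s u w haw
        rcases List.mem_append.mp hu with h | h
        · exact s2 w (i4 u h w haw)
        · rw [List.mem_singleton.mp h] at haw
          exact (s3 w hMw).mpr (Or.inr ((hadj w).mpr haw))
      have i5' : ∀ w ∈ (comp ++ [v]) ++ (pvScanB gp (pvGetL gp v) vis rest).2,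
          pvConn roads s w := by
        intro w hw
        rcases List.mem_append.mp hw with h | h
        · rcases List.mem_append.mp h with h1 | h1
          · exact i5 w (List.mem_append_left _ h1)
          · rw [List.mem_singleton.mp h1]
            exact i5 v (List.mem_append_right _ List.mem_cons_self)
        · rcases hstk'char w h with h1 | ⟨h1, _⟩
          · exact i5 w (List.mem_append_right _ (List.mem_cons_of_mem _ h1))
          · exact Relation.ReflTransGen.tail
              (i5 v (List.mem_append_right _ List.mem_cons_self)) ((hadj w).mp h1)
      obtain ⟨visF, f1, f2, f3, f4, f5, f6, f7⟩ := ih (N - 1) (by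
          simp only [List.length_cons] at hN
          omega) gp (pvScanB gp (pvGetL gp v) vis rest).1
        (pvScanB gp (pvGetL gp v) vis rest).2 (comp ++ [v]) hle
        (by intro x y hx hy h; exact halias x y hx hy (by rwa [s1] at h))
        (by intro w hw; rw [s1]; exact hinB w hw)
        (s1.trans hszg) hgp i1' i2' i3' i4' i5'
      exact ⟨visF, f1.trans s1, f2, f3, fun w h => f4 w (s2 w h), f5, f6, f7⟩

-- ---------- B's fixpoint: membership = connectivity ----------

theorem pvPass_master (roads : List (Int × Int)) (s : Int) :
    ∀ (l : List (Int × Int)), (∀ p ∈ l, p ∈ roads) →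
    ∀ (r : List Int) (ch : Bool), r.Nodup → (∀ w ∈ r, pvConn roads s w) →
    ∃ ext, pvPassB l (r, r, ch) = (r ++ ext, r ++ ext, ch || !ext.isEmpty) ∧
      (r ++ ext).Nodup ∧
      (∀ w ∈ ext, ∃ p ∈ l, w = p.1 ∨ w = p.2) ∧
      (∀ w ∈ r ++ ext, pvConn roads s w) ∧
      (ext = [] → ∀ p ∈ l, (p.1 ∈ r ↔ p.2 ∈ r)) := by
  intro l
  induction l with
  | nil =>
    intro _ r ch hnd hconn
    refine ⟨[], by simp [pvPassB], by simpa using hnd, by simp, by simpa using hconn, ?_⟩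
    intro _ p hp
    simp at hp
  | cons p rest ihl =>
    intro hsub r ch hnd hconn
    have hstep : pvPassB (p :: rest) (r, r, ch) =
        pvPassB rest (if PySem.Set.contains r p.1 != PySem.Set.contains r p.2 then
          (r ++ [if PySem.Set.contains r p.1 then p.2 else p.1],
           PySem.Set.add r (if PySem.Set.contains r p.1 then p.2 else p.1), true)
          else (r, r, ch)) := rfl
    rw [hstep]
    by_cases hc : PySem.Set.contains r p.1 != PySem.Set.contains r p.2
    · rw [if_pos hc]
      set c := if PySem.Set.contains r p.1 then p.2 else p.1 with hcdef
      have hcnotmem : c ∉ r := by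
        by_cases h1 : PySem.Set.contains r p.1
        · have h2 : PySem.Set.contains r p.2 = false := by
            cases h2 : PySem.Set.contains r p.2
            · rfl
            · rw [h1, h2] at hc
              simp at hc
          rw [hcdef, if_pos h1]
          intro hm
          rw [(PySem.Set.contains_iff _ _).mpr hm] at h2
          simp at h2
        · rw [hcdef, if_neg h1]
          intro hm
          exact h1 ((PySem.Set.contains_iff _ _).mpr hm)
      have hconn_c : pvConn roads s c := by
        by_cases h1 : PySem.Set.contains r p.1
        · have ho : p.1 ∈ r := (PySem.Set.contains_iff _ _).mp h1
          refine Relation.ReflTransGen.tail (hconn p.1 ho) ?_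
          exact ⟨p, hsub p List.mem_cons_self, Or.inl ⟨rfl, by rw [hcdef, if_pos h1]⟩⟩
        · have h2 : PySem.Set.contains r p.2 = true := by
            cases h2 : PySem.Set.contains r p.2
            · rw [eq_false_of_ne_true h1, h2] at hc
              simp at hc
            · rfl
          have ho : p.2 ∈ r := (PySem.Set.contains_iff _ _).mp h2
          refine Relation.ReflTransGen.tail (hconn p.2 ho) ?_
          exact ⟨p, hsub p List.mem_cons_self, Or.inr ⟨rfl, by rw [hcdef, if_neg h1]⟩⟩
      have hadd : PySem.Set.add r c = r ++ [c] := PySem.Set.add_of_not_mem hcnotmem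
      rw [hadd]
      have hnd' : (r ++ [c]).Nodup := by
        rw [List.nodup_append]
        refine ⟨hnd, List.nodup_singleton c, ?_⟩
        intro a ha b hb
        rw [List.mem_singleton] at hb
        rw [hb]
        intro heq
        exact hcnotmem (heq ▸ ha)
      have hconn' : ∀ w ∈ r ++ [c], pvConn roads s w := by
        intro w hw
        rcases List.mem_append.mp hw with h | h
        · exact hconn w h
        · rw [List.mem_singleton.mp h]
          exact hconn_c
      obtain ⟨ext', heq, hnodup', hsrc', hconn'', hfix'⟩ :=
        ihl (fun q hq => hsub q (List.mem_cons_of_mem _ hq)) (r ++ [c]) true hnd' hconn'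
      refine ⟨c :: ext', ?_, ?_, ?_, ?_, ?_⟩
      · rw [heq]
        simp [List.append_assoc]
      · simpa [List.append_assoc] using hnodup'
      · intro w hw
        rcases List.mem_cons.mp hw with h | h
        · refine ⟨p, List.mem_cons_self, ?_⟩
          rw [h, hcdef]
          split_ifs <;> simp
        · obtain ⟨q, hq, hqq⟩ := hsrc' w h
          exact ⟨q, List.mem_cons_of_mem _ hq, hqq⟩
      · intro w hw
        apply hconn''
        simpa [List.append_assoc] using hw
      · intro h
        exact absurd h (List.cons_ne_nil _ _)
    · rw [if_neg hc]
      obtain ⟨ext, heq, h1, h2, h3, h4⟩ := ihl (fun q hq => hsub q (List.mem_cons_of_mem _ hq))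
        r ch hnd hconn
      refine ⟨ext, heq, h1, ?_, h3, ?_⟩
      · intro w hw
        obtain ⟨q, hq, hqq⟩ := h2 w hw
        exact ⟨q, List.mem_cons_of_mem _ hq, hqq⟩
      · intro hext q hq
        rcases List.mem_cons.mp hq with hqp | hqr
        · subst hqp
          have hceq : PySem.Set.contains r q.1 = PySem.Set.contains r q.2 := by
            simpa using hc
          constructor
          · intro hm
            exact (PySem.Set.contains_iff _ _).mp (hceq ▸ (PySem.Set.contains_iff _ _).mpr hm)
          · intro hm
            exact (PySem.Set.contains_iff _ _).mp (hceq ▸ (PySem.Set.contains_iff _ _).mpr hm)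
        · exact h4 hext q hqr

theorem pvLoop_main (roads : List (Int × Int)) (s : Int) :
    ∀ (fuel : Nat) (r : List Int),
    r.Nodup → (∀ w ∈ r, pvConn roads s w) →
    (∀ w ∈ r, w ∈ pvLabels roads s) →
    (∃ t, r = s :: t) →
    (pvLabels roads s).length + 1 ≤ fuel + r.length →
    (pvLoopB roads fuel r r).Nodup ∧
    (∃ t, pvLoopB roads fuel r r = s :: t) ∧
    (∀ w ∈ pvLoopB roads fuel r r, pvConn roads s w) ∧
    (∀ w ∈ pvLoopB roads fuel r r, w ∈ pvLabels roads s) ∧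
    (∀ p ∈ roads, (p.1 ∈ pvLoopB roads fuel r r ↔ p.2 ∈ pvLoopB roads fuel r r)) := by
  intro fuel
  induction fuel with
  | zero =>
    intro r hnd _ hsubX _ hnum
    exfalso
    have hlen : r.length ≤ (pvLabels roads s).length :=
      (List.subperm_of_subset hnd hsubX).length_le
    omega
  | succ fuel ih =>
    intro r hnd hconn hsubX hhead hnum
    obtain ⟨ext, heq, hnodup, hsrc, hconn', hfix⟩ :=
      pvPass_master roads s roads (fun _ h => h) r false hnd hconn
    have hunf : pvLoopB roads (fuel + 1) r r =
        if (pvPassB roads (r, r, false)).2.2 then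
          pvLoopB roads fuel (pvPassB roads (r, r, false)).1 (pvPassB roads (r, r, false)).2.1
        else (pvPassB roads (r, r, false)).1 := rfl
    rw [hunf, heq]
    by_cases hext : ext = []
    · subst hext
      simp only [List.isEmpty_nil, Bool.not_true, Bool.false_or, Bool.false_eq_true,
        if_false, List.append_nil]
      refine ⟨hnd, hhead, hconn, hsubX, ?_⟩
      intro p hp
      exact hfix rfl p hp
    · have hbe : (false || !ext.isEmpty) = true := by
        simp [List.isEmpty_eq_false_iff, hext]
      rw [hbe, if_pos rfl]
      obtain ⟨t, ht⟩ := hhead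
      apply ih (r ++ ext) hnodup hconn'
      · intro w hw
        rcases List.mem_append.mp hw with h | h
        · exact hsubX w h
        · obtain ⟨q, hq, hqq⟩ := hsrc w h
          rcases hqq with h2 | h2 <;> subst h2 <;>
            exact List.mem_cons_of_mem _ (List.mem_flatMap.mpr ⟨q, hq, by simp⟩)
      · exact ⟨t ++ ext, by rw [ht, List.cons_append]⟩
      · have hextlen : 1 ≤ ext.length := by
          cases ext
          · exact absurd rfl hext
          · simp
        rw [List.length_append]
        omega

-- ---------- arithmetic glue ----------

theorem pvFac_all (l : List Int) : ∀ f : Array Int, (∀ x ∈ f.toList, 0 ≤ x ∧ x < pvMOD) →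
    ∀ x ∈ (l.foldl (fun f i => pvSetI f i (PySem.Int.mod (pvGetI f (i - 1) * i) pvMOD)) f).toList,
      0 ≤ x ∧ x < pvMOD := by
  induction l with
  | nil => intro f hf; exact hf
  | cons j rest ih =>
    intro f hf
    simp only [List.foldl_cons]
    apply ih
    intro x hx
    by_cases h : -(f.size : Int) ≤ j
    · rw [pvSetI, if_pos h, Array.toList_setIfInBounds] at hx
      rcases List.mem_or_eq_of_mem_set hx with h1 | h1
      · exact hf _ h1
      · subst h1
        exact ⟨PySem.Int.mod_nonneg _ (by norm_num [pvMOD]),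
          PySem.Int.mod_lt _ (by norm_num [pvMOD])⟩
    · rw [pvSetI, if_neg h] at hx
      exact hf _ hx

theorem pvFac_bounds (k : Nat) : 0 ≤ pvFacA.getD k 0 ∧ pvFacA.getD k 0 < pvMOD := by
  have hall := pvFac_all (PySem.List.pyRange 1 100001 1)
    ((Array.replicate 100001 (0 : Int)).setIfInBounds 0 1) (by
      intro x hx
      rw [Array.toList_setIfInBounds, Array.toList_replicate] at hx
      rcases List.mem_or_eq_of_mem_set hx with h1 | h1
      · rw [List.eq_of_mem_replicate h1]
        norm_num [pvMOD]
      · rw [h1]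
        norm_num [pvMOD])
  by_cases hk : k < pvFacA.size
  · have hm : pvFacA.getD k 0 = pvFacA.toList[k]'(by simpa using hk) := by
      simp [Array.getD, hk, Array.getElem_toList]
    rw [hm]
    exact hall _ (List.getElem_mem _)
  · rw [Array.getD, dif_neg hk]
    norm_num [pvMOD]

-- B's degree build loop equals the second component of A's combined build loop
theorem pvFold_snd (l : List (Int × Int)) : ∀ (g : Array (List Int)) (d : Array Int),
    (l.foldl
      (fun gd p =>
        (pvSetL (pvSetL gd.1 p.1 (pvGetL gd.1 p.1 ++ [p.2])) p.2
           (pvGetL (pvSetL gd.1 p.1 (pvGetL gd.1 p.1 ++ [p.2])) p.2 ++ [p.1]),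
         pvSetI (pvSetI gd.2 p.1 (pvGetI gd.2 p.1 + 1)) p.2
           (pvGetI (pvSetI gd.2 p.1 (pvGetI gd.2 p.1 + 1)) p.2 + 1)))
      (g, d)).2 =
    l.foldl
      (fun d p => pvSetI (pvSetI d p.1 (pvGetI d p.1 + 1)) p.2
        (pvGetI (pvSetI d p.1 (pvGetI d p.1 + 1)) p.2 + 1)) d := by
  induction l with
  | nil => intro g d; rfl
  | cons p rest ih =>
    intro g d
    simp only [List.foldl_cons]
    exact ih _ _

theorem pvDegB_snd (n : Int) (roads : List (Int × Int)) :
    pvDegB n roads = (pvBuildA n roads).2 := by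
  rw [pvDegB, pvBuildA, pvFold_snd]

theorem pvLabels_length (roads : List (Int × Int)) (s : Int) :
    (pvLabels roads s).length = 1 + 2 * roads.length := by
  unfold pvLabels
  induction roads with
  | nil => simp
  | cons p rest ih =>
    simp only [List.flatMap_cons, List.cons_append, List.nil_append, List.length_cons] at *
    omega

-- ===== VERDICT (by name: the statement is the Claim_ definition above) =====
set_option maxHeartbeats 2000000 in
theorem count_visit_ways_spec : Claim_equal_count_visit_ways := by
  intro n roads s hdom hpre
  obtain ⟨hn0, hbnd, hali, _⟩ := hpre
  unfold Spec_count_visit_ways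
  show count_visit_ways n roads s = count_visit_ways_alt n roads s
  have hMpos : (0 : Int) < pvMOD := by norm_num [pvMOD]
  obtain ⟨hsz1, hsz2⟩ := pvBuild_size n roads
  have hn1 : ((n + 1).toNat : Int) = n + 1 := by omega
  have hsmem : s ∈ pvLabels roads s := List.mem_cons_self
  have hlabB : ∀ x ∈ pvLabels roads s, pvInB (n + 1).toNat x := by
    intro x hx
    have := hbnd x hx
    exact ⟨by omega, by omega⟩
  have hsB : pvInB (n + 1).toNat s := hlabB s hsmem
  have hendmem : ∀ p ∈ roads, p.1 ∈ pvLabels roads s ∧ p.2 ∈ pvLabels roads s := by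
    intro p hp
    constructor <;> exact List.mem_cons_of_mem _
      (List.mem_flatMap.mpr ⟨p, hp, by simp⟩)
  -- A's answer is the pvStep-fold over the DFS pop order C
  have hvsz : (pvSetI (Array.replicate (n + 1).toNat (0 : Int)) s 1).size = (n + 1).toNat := by
    rw [pvSize_setI, Array.size_replicate]
  have hsBr : pvInB (Array.replicate (n + 1).toNat (0 : Int)).size s := by
    rw [Array.size_replicate]; exact hsB
  have hsvis : pvGetI (pvSetI (Array.replicate (n + 1).toNat (0 : Int)) s 1) s ≠ 0 := by
    rw [pvGetI_setI _ s s 1 hsBr hsBr, if_pos rfl]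
    norm_num
  have hstack : SInvW (· ∈ pvLabels roads s)
      (pvSetI (Array.replicate (n + 1).toNat (0 : Int)) s 1) [s] := by
    intro v hv
    rw [List.mem_singleton] at hv
    subst hv
    exact ⟨hsmem, by rw [hvsz]; exact hsB, hsvis⟩
  have hdinv : DInv s (pvBuildA n roads).2
      (pvSetI (Array.replicate (n + 1).toNat (0 : Int)) s 1) (pvBuildA n roads).2 := by
    intro c hc0 hcLt
    rw [hsz2] at hcLt
    have hcB : pvInB (Array.replicate (n + 1).toNat (0 : Int)).size c := by
      rw [Array.size_replicate]; exact ⟨by omega, hcLt⟩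
    rw [pvGetI_setI _ s c 1 hsBr hcB]
    split
    · rename_i h
      rw [Array.size_replicate] at h
      rw [if_neg (fun hx => hx.2 (by rw [hsz2, h, pvCell_nonneg_id _ c hc0]))]
      ring
    · rw [pvGetI_replicate]
      simp
  simp only [count_visit_ways]
  rw [pvDfs_eq (2 * pvZ (pvSetI (Array.replicate (n + 1).toNat (0 : Int)) s 1) + 1)
    (pvBuildA n roads).1 (pvBuildA n roads).2 (· ∈ pvLabels roads s) s _ _ [s] 1 (by simp)
    (by rw [hsz1]; exact fun x y hx hy h => hali x hx y hy h)
    (pvBuild_ginv (· ∈ pvLabels roads s) n roads (fun p hp =>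
      ⟨hlabB p.1 (hendmem p hp).1, hlabB p.2 (hendmem p hp).2,
       (hendmem p hp).1, (hendmem p hp).2⟩))
    (by rw [hvsz, hsz1]) (by rw [hsz2, hsz1]) (by rw [hsz2, hsz1])
    hsmem (by rw [hsz1]; exact hsB) hsvis hstack hdinv (by norm_num) (by norm_num [pvMOD])]
  obtain ⟨b0, b1⟩ := pvStep_bounds (pvBuildA n roads).2 s
    (pvCollectB (pvBuildA n roads).1 [s]
      (pvSetI (Array.replicate (n + 1).toNat (0 : Int)) s 1) []) 1
    (by norm_num) (by norm_num [pvMOD])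
  rw [PySem.Int.mod_eq_emod_of_pos hMpos, Int.emod_eq_of_lt b0 b1]
  -- names for the two component lists
  set vis0 := pvSetI (Array.replicate (n + 1).toNat (0 : Int)) s 1 with hvis0
  set C := pvCollectB (pvBuildA n roads).1 [s] vis0 [] with hCdef
  -- adjacency characterization of A's built adjacency lists
  have hgp : ∀ u, u ∈ pvLabels roads s → pvInB (pvBuildA n roads).1.size u →
      ∀ i, (i ∈ pvGetL (pvBuildA n roads).1 u ↔ pvAdj roads u i) := by
    intro u hu huB i
    have haux := pvBuild_adj_aux roads (Array.replicate (n + 1).toNat ([] : List Int))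
      (Array.replicate (n + 1).toNat (0 : Int)) (by
        intro p hp
        rw [Array.size_replicate]
        exact ⟨hlabB p.1 (hendmem p hp).1, hlabB p.2 (hendmem p hp).2⟩)
      u (by rw [Array.size_replicate]; rw [hsz1] at huB; exact huB) i
    simp only [Array.size_replicate] at haux
    rw [pvBuildA]
    rw [haux, pvGetL_replicate]
    simp only [List.not_mem_nil, false_or]
    constructor
    · rintro ⟨p, hp, ⟨hc, hi⟩ | ⟨hc, hi⟩⟩
      · exact ⟨p, hp, Or.inl ⟨(hali p.1 (hendmem p hp).1 u hu hc.symm), hi.symm⟩⟩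
      · exact ⟨p, hp, Or.inr ⟨(hali p.2 (hendmem p hp).2 u hu hc.symm), hi.symm⟩⟩
    · rintro ⟨p, hp, ⟨h1, h2⟩ | ⟨h1, h2⟩⟩
      · exact ⟨p, hp, Or.inl ⟨by rw [h1], h2.symm⟩⟩
      · exact ⟨p, hp, Or.inr ⟨by rw [h1], h2.symm⟩⟩
  -- membership in C = connectivity; C is nodup
  obtain ⟨visF, f1, f2, f3, f4, f5, f6, f7⟩ := pvCollectB_main roads s
    (2 * pvZ vis0 + 1) (pvBuildA n roads).1 vis0 [s] [] (by simp)
    (by rw [hvsz]; exact fun x y hx hy h => hali x hx y hy h)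
    (by rw [hvsz]; exact hlabB)
    (by rw [hvsz, hsz1]) hgp
    (by intro w hw; rw [List.nil_append, List.mem_singleton] at hw; rw [hw]; exact hsmem)
    (by simp)
    (by
      intro w hw
      rw [List.nil_append, List.mem_singleton]
      rw [hvis0, pvGetI_setI _ s w 1 hsBr (by rw [Array.size_replicate]; exact hlabB w hw)]
      constructor
      · intro h
        by_cases hws : s = w
        · exact hws.symm
        · exfalso
          rw [if_neg (by
            rw [Array.size_replicate]
            exact fun hc => hws (hali s hsmem w hw hc)), pvGetI_replicate] at h
          exact h rfl
      · intro h
        rw [h, if_pos rfl]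
        norm_num)
    (by intro v hv; simp at hv)
    (by
      intro w hw
      rw [List.nil_append, List.mem_singleton] at hw
      rw [hw]
      exact Relation.ReflTransGen.refl)
  rw [← hCdef] at f2 f3 f5 f6 f7
  have hCmem : ∀ w, w ∈ C ↔ pvConn roads s w := by
    intro w
    constructor
    · exact f6 w
    · intro hconn
      induction hconn with
      | refl => exact (f5 s hsmem).mpr (f4 s hsvis)
      | tail hc hadj ihc =>
        rename_i u w'
        exact (f5 w' (pvAdj_mem_labels roads s u w' hadj)).mpr (f7 u ihc w' hadj)
  -- C starts with s
  obtain ⟨tC, htC⟩ : ∃ tC, C = s :: tC := by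
    rw [hCdef]
    have hC1 : pvCollectB (pvBuildA n roads).1 [s] vis0 [] =
        pvCollectB (pvBuildA n roads).1
          (pvScanB (pvBuildA n roads).1 (pvGetL (pvBuildA n roads).1 s) vis0 []).2
          (pvScanB (pvBuildA n roads).1 (pvGetL (pvBuildA n roads).1 s) vis0 []).1
          ([] ++ [s]) := by
      rw [pvCollectB]
    rw [hC1, pvCollectB_append
      (2 * pvZ (pvScanB (pvBuildA n roads).1 (pvGetL (pvBuildA n roads).1 s) vis0 []).1 +
        (pvScanB (pvBuildA n roads).1 (pvGetL (pvBuildA n roads).1 s) vis0 []).2.length)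
      _ _ _ _ (le_refl _)]
    exact ⟨_, rfl⟩
  -- B's reachable list R: nodup, starts with s, membership = connectivity
  have hofl : PySem.Set.ofList [s] = [s] := rfl
  set R := pvLoopB roads (2 * roads.length + 2) [s] [s] with hRdef
  obtain ⟨L1, ⟨tR, htR⟩, L3, L4, L5⟩ := pvLoop_main roads s (2 * roads.length + 2) [s]
    (List.nodup_singleton s)
    (by
      intro w hw
      rw [List.mem_singleton] at hw
      rw [hw]
      exact Relation.ReflTransGen.refl)
    (by
      intro w hw
      rw [List.mem_singleton] at hw
      rw [hw]
      exact hsmem)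
    ⟨[], rfl⟩
    (by
      rw [pvLabels_length]
      simp
      omega)
  rw [← hRdef] at L1 htR L3 L4 L5
  have hRmem : ∀ w, w ∈ R ↔ pvConn roads s w := by
    intro w
    constructor
    · exact L3 w
    · intro hconn
      induction hconn with
      | refl => rw [htR]; exact List.mem_cons_self
      | tail hc hadj ihc =>
        rename_i u w'
        obtain ⟨p, hp, hor⟩ := hadj
        rcases hor with ⟨h1, h2⟩ | ⟨h1, h2⟩
        · rw [← h2]
          exact (L5 p hp).mp (h1 ▸ ihc)
        · rw [← h2]
          exact (L5 p hp).mpr (h1 ▸ ihc)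
  -- C and R are permutations of each other; so are their tails
  have hperm : C.Perm R :=
    (List.perm_ext_iff_of_nodup f2 L1).mpr (fun a => (hCmem a).trans (hRmem a).symm)
  have htperm : tC.Perm tR := by
    apply (List.perm_cons s).mp
    rw [← htC, ← htR]
    exact hperm
  have hsnotC : s ∉ tC := by
    have := f2
    rw [htC, List.nodup_cons] at this
    exact this.1
  -- the arithmetic pass: fold over C = fold over R
  simp only [count_visit_ways_alt, hofl]
  rw [pvDegB_snd, ← hRdef, htR]
  simp only [List.drop_succ_cons, List.drop_zero]
  rw [htC]
  simp only [List.foldl_cons]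
  have hinit : pvStep (pvBuildA n roads).2 s 1 s =
      pvFacB.getD (pvGetI (pvBuildA n roads).2 s).toNat 0 := by
    rw [pvStep, if_pos rfl, one_mul]
    obtain ⟨fb0, fb1⟩ := pvFac_bounds (pvGetI (pvBuildA n roads).2 s).toNat
    rw [PySem.Int.mod_eq_emod_of_pos hMpos, Int.emod_eq_of_lt fb0 fb1]
    rfl
  rw [hinit]
  have hcong : ∀ (t : List Int), (∀ v ∈ t, v ≠ s) →
      ∀ a : Int, t.foldl (pvStep (pvBuildA n roads).2 s) a =
        t.foldl (fun a v =>
          PySem.Int.mod (a * pvFacB.getD (pvGetI (pvBuildA n roads).2 v - 1).toNat 0)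
            pvMOD) a := by
    intro t ht a
    apply PySem.List.foldl_congr_mem
    intro acc x hx
    rw [pvStep, if_neg (ht x hx)]
    rfl
  rw [hcong tC (by
    intro v hv hvs
    exact hsnotC (hvs ▸ hv))]
  have hrc : RightCommutative (fun (a v : Int) =>
      PySem.Int.mod (a * pvFacB.getD (pvGetI (pvBuildA n roads).2 v - 1).toNat 0)
        pvMOD) := by
    constructor
    intro b x y
    simp only [PySem.Int.mod_eq_emod_of_pos hMpos]
    rw [Int.mul_emod (b * pvFacB.getD (pvGetI (pvBuildA n roads).2 x - 1).toNat 0 % pvMOD) _,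
      Int.emod_emod_of_dvd _ dvd_rfl,
      ← Int.mul_emod,
      Int.mul_emod (b * pvFacB.getD (pvGetI (pvBuildA n roads).2 y - 1).toNat 0 % pvMOD) _,
      Int.emod_emod_of_dvd _ dvd_rfl,
      ← Int.mul_emod]
    ring_nf
  exact htperm.foldl_eq _
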